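-- pv_equiv track=rewrite | github.com/williamjackson314/Trees | Trees.py | search
-- ===== SOURCE A (Python) =====
-- def left(index) :
--     return (2 * index + 1)
--
-- def right(index):
--     return (2 * index + 2)
--
-- def search(tree, target):
--     i = 0
--     while i < len(tree) and tree[i] is not None :
--         if target == tree[i] :
--             return i
--         elif target < tree[i] :
--             i = left(i)
--         else : # target > tree[i]
--             i = right(i)
--
--     return i
-- ===== SOURCE B (Python) =====
-- def search(tree, target):
--     n = len(tree)
--
--     def go(i):
--         if i >= n or tree[i] is None:
--             return i
--         v = tree[i]
--         if target == v:
--             return i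
--         return go(2 * i + 1) if target < v else go(2 * i + 2)
--
--     return go(0)
-- ===== Notes on version B (the rewrite author's own statement) =====
-- stated objective: alternative
-- what changed: Replaced the iterative while-loop with a recursive descent helper that recurses into the left/right child index and returns the current index at an empty slot or out-of-range index.
import Mathlib
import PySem

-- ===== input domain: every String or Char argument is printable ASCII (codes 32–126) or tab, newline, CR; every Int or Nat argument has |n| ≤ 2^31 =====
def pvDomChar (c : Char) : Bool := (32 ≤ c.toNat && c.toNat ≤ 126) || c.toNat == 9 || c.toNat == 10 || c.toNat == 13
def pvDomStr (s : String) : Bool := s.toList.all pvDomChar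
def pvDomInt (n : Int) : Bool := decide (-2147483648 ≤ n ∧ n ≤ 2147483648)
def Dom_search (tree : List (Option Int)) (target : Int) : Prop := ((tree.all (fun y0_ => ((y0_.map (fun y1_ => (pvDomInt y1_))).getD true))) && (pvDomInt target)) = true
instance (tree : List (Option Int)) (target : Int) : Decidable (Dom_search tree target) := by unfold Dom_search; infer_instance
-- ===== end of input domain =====

-- B replaces A's iterative while-loop with a recursive descent helper; same values on all inputs (alternative decomposition, no speed claim).


-- ===== PORT A =====
-- helpers left/right of A
def pyLeft (index : Int) : Int := 2 * index + 1
def pyRight (index : Int) : Int := 2 * index + 2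

-- the while loop of A, as a tail-recursive function on the loop variable i
-- (the '0 ≤ i' guard only makes the index access total; i starts at 0 and never goes negative)
def searchWhile (tree : List (Option Int)) (target : Int) (i : Int) : Int :=
  if _hcond : 0 ≤ i ∧ i < (tree.length : Int) then
    match tree[i.toNat]? with
    | some (some v) =>
        if target = v then i
        else if target < v then searchWhile tree target (pyLeft i)
        else searchWhile tree target (pyRight i)
    | _ => i
  else i
termination_by tree.length - i.toNat
decreasing_by
  · simp only [pyLeft]; omega
  · simp only [pyRight]; omega

def search (tree : List (Option Int)) (target : Int) : Int :=
  searchWhile tree target 0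

-- ===== PORT B =====
-- recursive descent of B, index kept as a Nat
def descend (tree : List (Option Int)) (target : Int) (i : Nat) : Int :=
  match h : tree[i]? with
  | some (some v) =>
      if target = v then (i : Int)
      else if target < v then descend tree target (2 * i + 1)
      else descend tree target (2 * i + 2)
  | _ => (i : Int)
termination_by tree.length - i
decreasing_by
  all_goals
    have hi : i < tree.length := by
      by_contra hge
      simp [List.getElem?_eq_none (by omega : tree.length ≤ i)] at h
    omega

def search_alt (tree : List (Option Int)) (target : Int) : Int :=
  descend tree target 0

-- ===== PRECONDITION & SPEC =====
def Spec_search (tree : List (Option Int)) (target : Int) (out : Int) : Prop := out = search_alt tree target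
instance (tree : List (Option Int)) (target : Int) (out : Int) : Decidable (Spec_search tree target out) := by unfold Spec_search; infer_instance

-- ===== CLAIM (what is proved, stated in full; the proofs are below) =====
def Claim_equal_search : Prop := ∀ (tree : List (Option Int)) (target : Int), Dom_search tree target → Spec_search tree target (search tree target)

-- ===== LEMMAS AND PROOFS =====

-- the while loop at a nonnegative index computes exactly the recursive descent at that index
lemma searchWhile_eq_descend (tree : List (Option Int)) (target : Int) (i : Nat) :
    searchWhile tree target (i : Int) = descend tree target i := by
  fun_induction descend tree target i with
  | case1 i h =>
      rw [searchWhile]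
      have hi : i < tree.length := by
        by_contra hge
        simp [List.getElem?_eq_none (by omega : tree.length ≤ i)] at h
      simp only [Int.toNat_natCast, h]
      rw [dif_pos (by constructor <;> omega)]
      simp
  | case2 i v h hne hlt ih =>
      rw [searchWhile]
      have hi : i < tree.length := by
        by_contra hge
        simp [List.getElem?_eq_none (by omega : tree.length ≤ i)] at h
      simp only [Int.toNat_natCast, h]
      rw [dif_pos (by constructor <;> omega)]
      rw [if_neg hne, if_pos hlt, pyLeft]
      have hc : 2 * (i : Int) + 1 = ((2 * i + 1 : Nat) : Int) := by push_cast; ring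
      rw [hc, ih]
  | case3 i v h hne hge ih =>
      rw [searchWhile]
      have hi : i < tree.length := by
        by_contra hge'
        simp [List.getElem?_eq_none (by omega : tree.length ≤ i)] at h
      simp only [Int.toNat_natCast, h]
      rw [dif_pos (by constructor <;> omega)]
      rw [if_neg hne, if_neg hge, pyRight]
      have hc : 2 * (i : Int) + 2 = ((2 * i + 2 : Nat) : Int) := by push_cast; ring
      rw [hc, ih]
  | case4 i hnone =>
      rw [searchWhile]
      by_cases hi : i < tree.length
      · rw [dif_pos (by constructor <;> omega)]
        simp only [Int.toNat_natCast]
      · rw [dif_neg (by omega)]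

-- ===== VERDICT (by name: the statement is the Claim_ definition above) =====
theorem search_spec : Claim_equal_search := by
  intro tree target _
  unfold Spec_search search search_alt
  exact_mod_cast searchWhile_eq_descend tree target 0
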